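-- pv_equiv track=rewrite | github.com/lamantinX/perenoska | specs/.instructions/.scripts/analysis-status.py | get_chain_status
-- ===== SOURCE A (Python) =====
-- DOCS_DISPLAY = [
--     ("Discussion", "discussion"),
--     ("Design", "design"),
--     ("Plan Tests", "plan-test"),
--     ("Plan Dev", "plan-dev"),
--     ("Review", "review"),
-- ]
--
-- def get_chain_status(info: dict) -> str:
--     """Определить общий статус цепочки (по наименьшему прогрессу 4 основных)."""
--     priority = ["DRAFT", "WAITING", "RUNNING", "REVIEW", "DONE",
--                 "CONFLICT", "ROLLING_BACK", "REJECTED"]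
--     statuses = [info["docs"].get(label, "—")
--                 for label, _ in DOCS_DISPLAY[:4]]  # Только 4 основных
--     for p in priority:
--         if p in statuses:
--             return p
--     return "—"
-- ===== SOURCE B (Python) =====
-- DOCS_DISPLAY = [
--     ("Discussion", "discussion"),
--     ("Design", "design"),
--     ("Plan Tests", "plan-test"),
--     ("Plan Dev", "plan-dev"),
--     ("Review", "review"),
-- ]
--
-- def get_chain_status(info: dict) -> str:
--     """Determine chain status (lowest progress of the 4 main docs) via a rank table and one numeric min."""
--     priority = ["DRAFT", "WAITING", "RUNNING", "REVIEW", "DONE",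
--                 "CONFLICT", "ROLLING_BACK", "REJECTED"]
--     rank = {s: i for i, s in enumerate(priority)}
--     docs = info["docs"]
--     best = len(priority)
--     for label, _ in DOCS_DISPLAY[:4]:
--         best = min(best, rank.get(docs.get(label, "—"), len(priority)))
--     return priority[best] if best < len(priority) else "—"
-- ===== Notes on version B (the rewrite author's own statement) =====
-- stated objective: alternative
-- what changed: B replaces A's build-a-status-list-then-scan-the-priority-list structure with a precomputed status->rank dictionary and a single numeric min fold over the four doc labels, indexing back into the priority list at the end.
import Mathlib
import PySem

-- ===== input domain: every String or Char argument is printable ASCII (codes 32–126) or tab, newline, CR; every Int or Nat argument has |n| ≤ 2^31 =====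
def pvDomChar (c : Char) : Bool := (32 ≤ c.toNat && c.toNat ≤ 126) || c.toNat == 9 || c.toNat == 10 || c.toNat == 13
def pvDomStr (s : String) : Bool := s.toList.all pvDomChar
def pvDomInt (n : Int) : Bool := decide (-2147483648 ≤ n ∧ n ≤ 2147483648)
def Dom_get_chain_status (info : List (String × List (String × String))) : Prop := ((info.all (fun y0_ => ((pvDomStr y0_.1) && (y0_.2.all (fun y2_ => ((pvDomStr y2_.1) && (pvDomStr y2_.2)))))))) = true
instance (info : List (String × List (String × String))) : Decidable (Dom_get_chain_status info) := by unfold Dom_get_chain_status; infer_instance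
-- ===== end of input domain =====

-- B replaces A's status-list + priority-scan by a status→rank dictionary and a single numeric
-- min fold over the four labels (objective: alternative). Both A and B raise KeyError when the
-- "docs" key is missing; Pre_ excludes exactly those inputs.

-- ===== PORT A =====
def pvPriority : List String :=
  ["DRAFT", "WAITING", "RUNNING", "REVIEW", "DONE", "CONFLICT", "ROLLING_BACK", "REJECTED"]

def pvDocsDisplay : List (String × String) :=
  [("Discussion", "discussion"), ("Design", "design"), ("Plan Tests", "plan-test"),
   ("Plan Dev", "plan-dev"), ("Review", "review")]

-- 'for p in priority: if p in statuses: return p' then 'return "—"'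
def pvChainLoop : List String → List String → String
  | [], _ => "—"
  | p :: ps, ss => if ss.contains p then p else pvChainLoop ps ss

def get_chain_status (info : List (String × List (String × String))) : String :=
  -- info["docs"]: Pre_ guarantees the key; the getD default is only for totality
  let docs : PySem.Dict String String := PySem.Dict.mk ((PySem.Dict.mk info).getD "docs" [])
  let statuses := (pvDocsDisplay.take 4).map (fun lp => docs.getD lp.1 "—")
  pvChainLoop pvPriority statuses

-- ===== PORT B =====
-- rank = {s: i for i, s in enumerate(priority)}
def pvRank : PySem.Dict String Int :=
  (PySem.List.enumerate pvPriority 0).foldl (fun d p => d.insert p.2 p.1) PySem.Dict.empty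

def get_chain_status_alt (info : List (String × List (String × String))) : String :=
  let docs : PySem.Dict String String := PySem.Dict.mk ((PySem.Dict.mk info).getD "docs" [])
  let best : Int := (pvDocsDisplay.take 4).foldl
      (fun b lp => min b (pvRank.getD (docs.getD lp.1 "—") 8)) 8
  if best < 8 then pvPriority.getD best.toNat "—" else "—"

-- ===== PRECONDITION & SPEC =====
-- Pre_ excludes exactly the inputs without a "docs" key, on which A (and B) raise KeyError.
def Pre_get_chain_status (info : List (String × List (String × String))) : Prop :=
  "docs" ∈ info.map Prod.fst
instance (info : List (String × List (String × String))) : Decidable (Pre_get_chain_status info) := by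
  unfold Pre_get_chain_status; infer_instance

def pvWitness_get_chain_status : (List (String × List (String × String))) :=
  [("docs", [("Discussion", "DONE"), ("Design", "RUNNING")])]

def Spec_get_chain_status (info : List (String × List (String × String))) (out : String) : Prop := out = get_chain_status_alt info
instance (info : List (String × List (String × String))) (out : String) : Decidable (Spec_get_chain_status info out) := by unfold Spec_get_chain_status; infer_instance

-- ===== CLAIM (what is proved, stated in full; the proofs are below) =====
def Claim_equal_get_chain_status : Prop := ∀ (info : List (String × List (String × String))), Dom_get_chain_status info → Pre_get_chain_status info → Spec_get_chain_status info (get_chain_status info)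

-- ===== LEMMAS AND PROOFS =====

-- rank.get(s, 8)
def pvRk (s : String) : Int := pvRank.getD s 8

theorem pvRk_cases (s : String) :
    pvRk s = 8 ∨ ∃ k : Nat, k < 8 ∧ pvRk s = (k : Int) ∧ pvPriority.getD k "—" = s := by
  have h : pvRank = PySem.Dict.mk [("DRAFT", 0), ("WAITING", 1), ("RUNNING", 2), ("REVIEW", 3),
      ("DONE", 4), ("CONFLICT", 5), ("ROLLING_BACK", 6), ("REJECTED", 7)] := by rfl
  unfold pvRk
  rw [h]
  simp only [PySem.Dict.getD_eq_get?_getD, PySem.Dict.get?_mk_cons, beq_iff_eq]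
  split_ifs with h1 h2 h3 h4 h5 h6 h7 h8
  · exact Or.inr ⟨0, by omega, rfl, by rw [← h1]; rfl⟩
  · exact Or.inr ⟨1, by omega, rfl, by rw [← h2]; rfl⟩
  · exact Or.inr ⟨2, by omega, rfl, by rw [← h3]; rfl⟩
  · exact Or.inr ⟨3, by omega, rfl, by rw [← h4]; rfl⟩
  · exact Or.inr ⟨4, by omega, rfl, by rw [← h5]; rfl⟩
  · exact Or.inr ⟨5, by omega, rfl, by rw [← h6]; rfl⟩
  · exact Or.inr ⟨6, by omega, rfl, by rw [← h7]; rfl⟩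
  · exact Or.inr ⟨7, by omega, rfl, by rw [← h8]; rfl⟩
  · exact Or.inl rfl

theorem pvRk_nonneg (s : String) : 0 ≤ pvRk s := by
  rcases pvRk_cases s with h | ⟨k, _, hk, _⟩ <;> omega

theorem pvFold_le_init (ss : List String) : ∀ a : Int,
    ss.foldl (fun b s => min b (pvRk s)) a ≤ a := by
  induction ss with
  | nil => intro a; simp
  | cons x xs ih =>
      intro a
      simp only [List.foldl_cons]
      exact le_trans (ih _) (by omega)

theorem pvFold_le_mem (ss : List String) : ∀ (a : Int) (s : String), s ∈ ss →
    ss.foldl (fun b t => min b (pvRk t)) a ≤ pvRk s := by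
  induction ss with
  | nil => intro a s hs; cases hs
  | cons x xs ih =>
      intro a s hs
      simp only [List.foldl_cons]
      rcases List.mem_cons.mp hs with rfl | hmem
      · exact le_trans (pvFold_le_init _ _) (by omega)
      · exact ih _ _ hmem

theorem le_pvFold (ss : List String) : ∀ (a c : Int), c ≤ a → (∀ s ∈ ss, c ≤ pvRk s) →
    c ≤ ss.foldl (fun b s => min b (pvRk s)) a := by
  induction ss with
  | nil => intro a c h1 _; simpa
  | cons x xs ih =>
      intro a c h1 h2
      simp only [List.foldl_cons]
      exact ih _ _ (le_min h1 (h2 x List.mem_cons_self))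
        (fun s hs => h2 s (List.mem_cons_of_mem _ hs))

-- B's min value over a status list
def pvM (ss : List String) : Int := ss.foldl (fun b s => min b (pvRk s)) 8

theorem pvChain_key : ∀ (n k : Nat), k + n = 8 → ∀ ss : List String, (k : Int) ≤ pvM ss →
    pvChainLoop (pvPriority.drop k) ss =
      (if pvM ss < 8 then pvPriority.getD (pvM ss).toNat "—" else "—") := by
  intro n
  induction n with
  | zero =>
      intro k hk ss hm
      have hk8 : k = 8 := by omega
      subst hk8
      have hle : pvM ss ≤ 8 := pvFold_le_init ss 8
      have heq : pvM ss = 8 := le_antisymm hle hm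
      rw [heq]
      simp [pvPriority, pvChainLoop]
  | succ n ih =>
      intro k hk ss hm
      have hklt : k < 8 := by omega
      have hlen : k < pvPriority.length := by simpa [pvPriority] using hklt
      rw [List.drop_eq_getElem_cons hlen]
      have hPk : pvPriority[k] = pvPriority.getD k "—" := (List.getD_eq_getElem _ _ hlen).symm
      rw [hPk]
      simp only [pvChainLoop]
      have hrkk : pvRk (pvPriority.getD k "—") = (k : Int) := by
        interval_cases k <;> decide
      by_cases hc : ss.contains (pvPriority.getD k "—")
      · rw [if_pos hc]
        have hmemk : pvPriority.getD k "—" ∈ ss := by simpa using hc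
        have h1 : pvM ss ≤ (k : Int) := by
          have := pvFold_le_mem ss 8 _ hmemk
          rw [hrkk] at this; exact this
        have hmk : pvM ss = (k : Int) := le_antisymm h1 hm
        rw [hmk, if_pos (by omega : ((k : Nat) : Int) < 8)]
        simp
      · rw [if_neg hc]
        have hstep : ((k + 1 : Nat) : Int) ≤ pvM ss := by
          apply le_pvFold
          · push_cast; omega
          · intro s hs
            have hks : (k : Int) ≤ pvRk s :=
              le_trans hm (pvFold_le_mem ss 8 s hs)
            rcases pvRk_cases s with h8 | ⟨j, hj, hjv, hjs⟩
            · omega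
            · by_cases hjk : j = k
              · exact absurd (by rw [hjk] at hjs; rw [hjs]; simpa using hs) hc
              · have : k ≤ j := by omega
                push_cast; omega
        exact ih (k + 1) (by omega) ss hstep

theorem pvMain (docs : PySem.Dict String String) :
    pvChainLoop pvPriority ((pvDocsDisplay.take 4).map (fun lp => docs.getD lp.1 "—")) =
      (if ((pvDocsDisplay.take 4).foldl
          (fun b lp => min b (pvRank.getD (docs.getD lp.1 "—") 8)) 8) < 8 then
        pvPriority.getD ((pvDocsDisplay.take 4).foldl
          (fun b lp => min b (pvRank.getD (docs.getD lp.1 "—") 8)) 8).toNat "—"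
      else "—") := by
  have hb : (pvDocsDisplay.take 4).foldl
      (fun b lp => min b (pvRank.getD (docs.getD lp.1 "—") 8)) 8
      = pvM ((pvDocsDisplay.take 4).map (fun lp => docs.getD lp.1 "—")) := by
    rw [pvM, List.foldl_map]; simp only [pvRk]
  rw [hb]
  have h0 : ((0 : Nat) : Int) ≤ pvM ((pvDocsDisplay.take 4).map (fun lp => docs.getD lp.1 "—")) :=
    le_pvFold _ 8 0 (by omega) (fun s _ => pvRk_nonneg s)
  have hkey := pvChain_key 8 0 (by omega) _ h0
  rw [List.drop_zero] at hkey
  exact hkey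

-- ===== VERDICT (by name: the statement is the Claim_ definition above) =====
theorem get_chain_status_spec : Claim_equal_get_chain_status := by
  intro info _ _
  exact pvMain (PySem.Dict.mk ((PySem.Dict.mk info).getD "docs" []))
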